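-- pv_equiv track=rewrite | github.com/RobertShaw/HackerRankPractice | Practice/Interview Preparation Kit/Trees/Balanced Forest Slow AF.py | findTreeWorth
-- ===== SOURCE A (Python) =====
-- def findTreeWorth(treeWorths, edgesMap, treeIndex, c):
--     treeWorthIndex = treeIndex - 1
--     if treeWorths[treeWorthIndex]:
--         return treeWorths[treeWorthIndex]
--     else:
--         treeWorth = sum(findTreeWorth(treeWorths, edgesMap, x, c) for x in edgesMap.get(treeIndex, []))
--
--         treeWorths[treeWorthIndex] = treeWorth + c[treeWorthIndex]
--         return treeWorths[treeWorthIndex]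
-- ===== SOURCE B (Python) =====
-- def findTreeWorth(treeWorths, edgesMap, treeIndex, c):
--     # Iterative post-order traversal with an explicit stack (no recursion).
--     # Mutates treeWorths like A does (same cache truthiness rule); the proved
--     # equivalence is about the return value.
--     stack = [(treeIndex, False)]
--     while stack:
--         node, expanded = stack.pop()
--         i = node - 1
--         if expanded:
--             treeWorths[i] = c[i] + sum(treeWorths[x - 1] for x in edgesMap.get(node, []))
--         elif not treeWorths[i]:
--             stack.append((node, True))
--             for x in edgesMap.get(node, []):
--                 stack.append((x, False))
--     return treeWorths[treeIndex - 1]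
-- ===== Notes on version B (the rewrite author's own statement) =====
-- stated objective: alternative
-- what changed: A's memoized recursion (one Python call frame per node) is replaced by an iterative post-order traversal driven by an explicit stack of (node, expanded) entries that reads child worths back out of the cache array, with the same truthiness-based cache rule.
-- outside the precondition, e.g. on findTreeWorth([0, 0, 0], {3: [-1, 2]}, 3, [2, -3, 0, 3, 2]): A returns 6, B returns -6
import Mathlib
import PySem

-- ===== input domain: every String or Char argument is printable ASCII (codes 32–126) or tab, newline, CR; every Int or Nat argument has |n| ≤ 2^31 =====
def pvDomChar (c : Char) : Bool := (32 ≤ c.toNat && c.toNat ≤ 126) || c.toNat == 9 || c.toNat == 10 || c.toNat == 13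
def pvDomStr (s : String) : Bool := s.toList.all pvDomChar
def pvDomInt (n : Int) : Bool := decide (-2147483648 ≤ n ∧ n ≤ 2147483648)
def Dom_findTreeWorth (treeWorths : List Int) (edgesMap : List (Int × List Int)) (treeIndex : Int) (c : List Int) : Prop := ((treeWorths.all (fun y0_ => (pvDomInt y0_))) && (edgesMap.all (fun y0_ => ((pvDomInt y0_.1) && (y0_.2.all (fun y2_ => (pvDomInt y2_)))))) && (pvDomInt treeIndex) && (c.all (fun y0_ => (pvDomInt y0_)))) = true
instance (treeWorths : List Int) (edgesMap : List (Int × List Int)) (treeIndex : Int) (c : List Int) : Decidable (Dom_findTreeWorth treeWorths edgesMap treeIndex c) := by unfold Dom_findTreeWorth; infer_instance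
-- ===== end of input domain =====

-- B replaces A's memoized recursion by an iterative post-order traversal with an explicit
-- stack (same cache-truthiness rule); both mutate the Python treeWorths list, the
-- equivalence proved here is about the RETURN value.

-- shared helpers: Python reads/writes; pyGetD/pySetD are exact for indices in Python range (Pre_)
def pvRd (xs : List Int) (i : Int) : Int := PySem.List.pyGetD xs i 0
def pvChildren (em : List (Int × List Int)) (v : Int) : List Int :=
  (PySem.Dict.get? (PySem.Dict.mk em) v).getD []
def pvSizeEM (em : List (Int × List Int)) : Nat := (em.map (fun p => p.2.length)).sum

-- ===== PORT A =====
-- fuel is a totality guard only: under Pre_ every cache-miss path has fewer than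
-- pvSizeEM edgesMap + 2 nodes, so the fuel never runs out.
def findTreeWorthAux (em : List (Int × List Int)) (c : List Int) :
    Nat → List Int → Int → List Int × Int
  | 0, tw, _ => (tw, 0)
  | fuel + 1, tw, ti =>
    let cached := pvRd tw (ti - 1)
    if cached ≠ 0 then (tw, cached)
    else
      let res := (pvChildren em ti).foldl
        (fun st x =>
          let r := findTreeWorthAux em c fuel st.1 x
          (r.1, st.2 + r.2)) (tw, (0 : Int))
      let w := res.2 + pvRd c (ti - 1)
      (PySem.List.pySetD res.1 (ti - 1) w, w)

def findTreeWorth (treeWorths : List Int) (edgesMap : List (Int × List Int)) (treeIndex : Int) (c : List Int) : Int :=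
  (findTreeWorthAux edgesMap c (pvSizeEM edgesMap + 3) treeWorths treeIndex).2

-- ===== PORT B =====
-- fuel is a totality guard only: under Pre_ the loop pops at most
-- 2 * (pvSizeEM edgesMap + 2) ^ (pvSizeEM edgesMap + 2) stack entries.
def pvFuelB (em : List (Int × List Int)) : Nat :=
  2 * (pvSizeEM em + 2) ^ (pvSizeEM em + 2)

def pvLoopB (em : List (Int × List Int)) (c : List Int) :
    Nat → List (Int × Bool) → List Int → List Int
  | 0, _, tw => tw
  | _ + 1, [], tw => tw
  | fuel + 1, (node, expanded) :: rest, tw =>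
    if expanded then
      pvLoopB em c fuel rest
        (PySem.List.pySetD tw (node - 1)
          (pvRd c (node - 1) + (pvChildren em node).foldl (fun a x => a + pvRd tw (x - 1)) 0))
    else if pvRd tw (node - 1) ≠ 0 then
      pvLoopB em c fuel rest tw
    else
      pvLoopB em c fuel
        (((pvChildren em node).reverse.map (fun x => (x, false))) ++ (node, true) :: rest) tw

def findTreeWorth_alt (treeWorths : List Int) (edgesMap : List (Int × List Int)) (treeIndex : Int) (c : List Int) : Int :=
  pvRd (pvLoopB edgesMap c (pvFuelB edgesMap) [(treeIndex, false)] treeWorths) (treeIndex - 1)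

-- ===== PRECONDITION & SPEC =====
-- pvT init c em m v: every cache-miss path of the traversal starting at node v stays in
-- Python index range, visits cache-miss nodes only with id ≥ 1 (no negative-index
-- wraparound at a node that gets expanded and written), and ends within m steps
-- (with m = pvSizeEM em + 2 steps this is exactly: no reachable cache-miss cycle).
def pvT (init c : List Int) (em : List (Int × List Int)) : Nat → Int → Bool
  | 0, v => decide (PySem.Raise.InRange init.length (v - 1)) && !(pvRd init (v - 1) == 0)
  | m + 1, v => decide (PySem.Raise.InRange init.length (v - 1)) &&
      (!(pvRd init (v - 1) == 0) ||
        (decide (1 ≤ v) && decide (v ≤ (c.length : Int)) &&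
          (pvChildren em v).all (fun x => pvT init c em m x)))

-- Pre_ excludes the inputs on which A raises (IndexError, or unbounded recursion on a
-- reachable cache-miss cycle) and the inputs on which a cache-miss node is reached
-- through Python's negative-index wraparound: there cell aliasing makes A's value an
-- artefact of mutation order, and B genuinely differs (it may return another value or
-- not terminate), so neither value is the specified one.
def Pre_findTreeWorth (treeWorths : List Int) (edgesMap : List (Int × List Int)) (treeIndex : Int) (c : List Int) : Prop :=
  pvT treeWorths c edgesMap (pvSizeEM edgesMap + 2) treeIndex = true
instance (treeWorths : List Int) (edgesMap : List (Int × List Int)) (treeIndex : Int) (c : List Int) : Decidable (Pre_findTreeWorth treeWorths edgesMap treeIndex c) := by unfold Pre_findTreeWorth; infer_instance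

def pvWitness_findTreeWorth : List Int × (List (Int × List Int)) × Int × List Int :=
  ([0, 0], [(1, [2])], 1, [3, 4])

def Spec_findTreeWorth (treeWorths : List Int) (edgesMap : List (Int × List Int)) (treeIndex : Int) (c : List Int) (out : Int) : Prop := out = findTreeWorth_alt treeWorths edgesMap treeIndex c
instance (treeWorths : List Int) (edgesMap : List (Int × List Int)) (treeIndex : Int) (c : List Int) (out : Int) : Decidable (Spec_findTreeWorth treeWorths edgesMap treeIndex c out) := by unfold Spec_findTreeWorth; infer_instance

-- ===== CLAIM (what is proved, stated in full; the proofs are below) =====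
def Claim_equal_findTreeWorth : Prop := ∀ (treeWorths : List Int) (edgesMap : List (Int × List Int)) (treeIndex : Int) (c : List Int), Dom_findTreeWorth treeWorths edgesMap treeIndex c → Pre_findTreeWorth treeWorths edgesMap treeIndex c → Spec_findTreeWorth treeWorths edgesMap treeIndex c (findTreeWorth treeWorths edgesMap treeIndex c)

-- ===== LEMMAS AND PROOFS =====

-- ghost subtree worth, computed from the INITIAL array, fuel-indexed
def pvW (init c : List Int) (em : List (Int × List Int)) : Nat → Int → Int
  | 0, _ => 0
  | f + 1, v =>
    if pvRd init (v - 1) ≠ 0 then pvRd init (v - 1)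
    else pvRd c (v - 1) + (pvChildren em v).foldl (fun a x => a + pvW init c em f x) 0

def pvWF (init c : List Int) (em : List (Int × List Int)) (v : Int) : Int :=
  pvW init c em (pvSizeEM em + 3) v

theorem pvW_succ (init c : List Int) (em : List (Int × List Int)) (f : Nat) (v : Int) :
    pvW init c em (f + 1) v =
      if pvRd init (v - 1) ≠ 0 then pvRd init (v - 1)
      else pvRd c (v - 1) + (pvChildren em v).foldl (fun a x => a + pvW init c em f x) 0 := by
  conv_lhs => rw [pvW]

-- array invariant: each initially-nonzero cell keeps its initial value; an
-- initially-zero cell is either still 0 or holds the ghost worth of its node id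
def pvOK (init c : List Int) (em : List (Int × List Int)) (tw : List Int) : Prop :=
  tw.length = init.length ∧ ∀ j : Nat, j < init.length →
    (pvRd init j ≠ 0 → pvRd tw j = pvRd init j) ∧
    (pvRd init j = 0 → pvRd tw j = 0 ∨ pvRd tw j = pvWF init c em (j + 1))

-- finalized cells stay finalized
def pvMono (init c : List Int) (em : List (Int × List Int)) (tw tw' : List Int) : Prop :=
  ∀ j : Nat, j < init.length → pvRd tw j = pvWF init c em (j + 1) → pvRd tw' j = pvWF init c em (j + 1)

theorem pvT_elim (init c : List Int) (em : List (Int × List Int)) (m : Nat) (v : Int)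
    (h : pvT init c em m v = true) :
    PySem.Raise.InRange init.length (v - 1) ∧
      (pvRd init (v - 1) ≠ 0 ∨
        (0 < m ∧ 1 ≤ v ∧ v ≤ (c.length : Int) ∧
          ∀ x ∈ pvChildren em v, pvT init c em (m - 1) x = true)) := by
  cases m with
  | zero =>
    simp [pvT] at h
    exact ⟨h.1, Or.inl h.2⟩
  | succ m =>
    simp [pvT] at h
    rcases h with ⟨h1, h2⟩
    refine ⟨h1, ?_⟩
    rcases h2 with h2 | h2
    · exact Or.inl h2
    · exact Or.inr ⟨by omega, h2.1.1, h2.1.2, by simpa using h2.2⟩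

theorem pvRd_pySetD (tw : List Int) (i w : Int) (h1 : 0 ≤ i) (h2 : i < (tw.length : Int))
    (j : Int) (hj : 0 ≤ j) :
    pvRd (PySem.List.pySetD tw i w) j = if j = i then w else pvRd tw j := by
  rw [PySem.List.pySetD_of_nonneg tw w h1]
  rw [pvRd, pvRd, PySem.List.pyGetD_of_nonneg _ _ hj, PySem.List.pyGetD_of_nonneg _ _ hj]
  by_cases h : j = i
  · subst h
    rw [if_pos rfl]
    have : j.toNat < tw.length := by omega
    simp [List.getD, this]
  · rw [if_neg h]
    have : i.toNat ≠ j.toNat := by omega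
    simp [List.getD, this]

theorem pvLen_pySetD (tw : List Int) (i w : Int) (h1 : 0 ≤ i) :
    (PySem.List.pySetD tw i w).length = tw.length := by
  rw [PySem.List.pySetD_of_nonneg tw w h1]; simp

theorem pvChildren_len (em : List (Int × List Int)) (v : Int) :
    (pvChildren em v).length ≤ pvSizeEM em := by
  induction em with
  | nil => simp [pvChildren, PySem.Dict.get?, pvSizeEM]
  | cons p rest ihm =>
    obtain ⟨key, vs⟩ := p
    rw [pvChildren, PySem.Dict.get?_mk_cons]
    by_cases hk : key = v
    · subst hk; simp [pvSizeEM]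
    · have hne2 : (key == v) = false := by simp [hk]
      rw [hne2]
      simp only [Bool.false_eq_true, if_false]
      have : pvSizeEM ((key, vs) :: rest) = vs.length + pvSizeEM rest := by
        simp [pvSizeEM]
      rw [pvChildren] at ihm
      omega

-- Python's negative-index wraparound, in terms of pvRd
theorem pvRd_wrap (xs : List Int) (i : Int) (hneg : i < 0) (hge : -(xs.length : Int) ≤ i) :
    pvRd xs i = pvRd xs (i + xs.length) := by
  obtain ⟨k, hk⟩ : ∃ k : Nat, i = -(k : Int) := ⟨(-i).toNat, by omega⟩
  subst hk
  have hj : -((k : Nat) : Int) + (xs.length : Int) = ((xs.length - k : Nat) : Int) := by omega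
  have hlt : xs.length - k < xs.length := by omega
  rw [pvRd, pvRd, hj, PySem.List.pyGetD_neg_natCast xs k 0 (by omega) (by omega),
    PySem.List.pyGetD_natCast, List.getD_eq_getElem?_getD, List.getElem?_eq_getElem hlt]
  rfl

-- pvW is independent of the fuel above the pvT level
theorem pvW_stab (init c : List Int) (em : List (Int × List Int)) :
    ∀ (m : Nat) (v : Int) (f1 f2 : Nat), pvT init c em m v = true → m < f1 → m < f2 →
      pvW init c em f1 v = pvW init c em f2 v := by
  intro m
  induction m with
  | zero =>
    intro v f1 f2 ht h1 h2
    match f1, f2 with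
    | a + 1, b + 1 =>
      obtain ⟨_, hv⟩ := pvT_elim init c em 0 v ht
      rcases hv with hv | hv
      · rw [pvW_succ, pvW_succ, if_pos hv, if_pos hv]
      · omega
  | succ m ih =>
    intro v f1 f2 ht h1 h2
    match f1, f2 with
    | a + 1, b + 1 =>
      rw [pvW_succ, pvW_succ]
      split
      · rfl
      · congr 1
        apply PySem.List.foldl_congr_mem
        intro acc x hx
        obtain ⟨_, hv⟩ := pvT_elim init c em (m + 1) v ht
        rcases hv with hv | hv
        · simp_all
        · have hx' := hv.2.2.2 x hx
          simp only [Nat.add_sub_cancel] at hx'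
          rw [ih x a b hx' (by omega) (by omega)]

theorem pvWF_pos (init c : List Int) (em : List (Int × List Int)) (v : Int)
    (h : pvRd init (v - 1) ≠ 0) : pvWF init c em v = pvRd init (v - 1) := by
  have : pvSizeEM em + 3 = (pvSizeEM em + 2) + 1 := rfl
  rw [pvWF, this, pvW_succ, if_pos h]

theorem pvWF_zero_case (init c : List Int) (em : List (Int × List Int)) (m : Nat) (v : Int)
    (hm : m < pvSizeEM em + 2) (ht : pvT init c em (m + 1) v = true)
    (h0 : pvRd init (v - 1) = 0) :
    pvWF init c em v =
      pvRd c (v - 1) + (pvChildren em v).foldl (fun a x => a + pvWF init c em x) 0 := by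
  have h3 : pvSizeEM em + 3 = (pvSizeEM em + 2) + 1 := rfl
  rw [pvWF, h3, pvW_succ, if_neg (by simp [h0])]
  congr 1
  apply PySem.List.foldl_congr_mem
  intro acc x hx
  obtain ⟨_, hv⟩ := pvT_elim init c em (m + 1) v ht
  rcases hv with hv | hv
  · exact absurd h0 hv
  · have hx' := hv.2.2.2 x hx
    simp only [Nat.add_sub_cancel] at hx'
    rw [pvW_stab init c em m x (pvSizeEM em + 2) (pvSizeEM em + 3) hx' (by omega) (by omega)]
    rfl

-- reading a cell whose INITIAL value is nonzero: clause 1 of the invariant, wraparound included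
theorem pvRd_clause1 (init c : List Int) (em : List (Int × List Int)) (tw : List Int)
    (hok : pvOK init c em tw) (v : Int)
    (hr : PySem.Raise.InRange init.length (v - 1)) (hne : pvRd init (v - 1) ≠ 0) :
    pvRd tw (v - 1) = pvRd init (v - 1) := by
  have hrng : -(init.length : Int) ≤ v - 1 ∧ v - 1 < init.length := by
    simpa [PySem.Raise.InRange] using hr
  have hlen := hok.1
  by_cases hv : v - 1 < 0
  · have hwt : pvRd tw (v - 1) = pvRd tw (v - 1 + init.length) := by
      rw [pvRd_wrap tw (v - 1) hv (by omega)]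
      congr 1
      omega
    have hwi : pvRd init (v - 1) = pvRd init (v - 1 + init.length) :=
      pvRd_wrap init (v - 1) hv (by omega)
    set j : Nat := (v - 1 + init.length).toNat with hjdef
    have hj : j < init.length := by omega
    have hcast : ((j : Nat) : Int) = v - 1 + init.length := by omega
    have h1 := (hok.2 j hj).1
    rw [hcast] at h1
    rw [hwt, hwi]
    exact h1 (by rw [← hwi]; exact hne)
  · set j : Nat := (v - 1).toNat with hjdef
    have hj : j < init.length := by omega
    have hcast : ((j : Nat) : Int) = v - 1 := by omega
    have h1 := (hok.2 j hj).1
    rw [hcast] at h1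
    exact h1 hne

-- a node whose CURRENT cell is 0 has initial cell 0 (so pvT certifies it is expandable)
theorem pvZero_node (init c : List Int) (em : List (Int × List Int)) (tw : List Int)
    (hok : pvOK init c em tw) (m : Nat) (v : Int) (ht : pvT init c em m v = true)
    (h0 : pvRd tw (v - 1) = 0) : pvRd init (v - 1) = 0 := by
  obtain ⟨hr, _⟩ := pvT_elim init c em m v ht
  by_contra hne
  have := pvRd_clause1 init c em tw hok v hr hne
  rw [h0] at this
  exact hne this.symm

-- reading a nonzero cell at a pvT-certified node yields the ghost worth
theorem pvOK_read (init c : List Int) (em : List (Int × List Int)) (tw : List Int)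
    (hok : pvOK init c em tw) (m : Nat) (v : Int) (ht : pvT init c em m v = true)
    (hne : pvRd tw (v - 1) ≠ 0) : pvRd tw (v - 1) = pvWF init c em v := by
  obtain ⟨hr, hv⟩ := pvT_elim init c em m v ht
  have hrng : -(init.length : Int) ≤ v - 1 ∧ v - 1 < init.length := by
    simpa [PySem.Raise.InRange] using hr
  by_cases h0 : pvRd init (v - 1) = 0
  · have h1 : 1 ≤ v := by
      rcases hv with hv | hv
      · exact absurd h0 hv
      · exact hv.2.1
    set j : Nat := (v - 1).toNat with hjdef
    have hj : j < init.length := by omega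
    have hcast : ((j : Nat) : Int) = v - 1 := by omega
    have h2 := (hok.2 j hj).2
    rw [hcast] at h2
    rcases h2 h0 with h | h
    · exact absurd h hne
    · rw [h]
      congr 1
      omega
  · rw [pvRd_clause1 init c em tw hok v hr h0, pvWF_pos init c em v h0]

theorem findTreeWorth_spec_lemmaA (init c : List Int) (em : List (Int × List Int)) :
    ∀ (m : Nat) (v : Int) (tw : List Int) (fuel : Nat), m < pvSizeEM em + 2 + 1 →
      pvT init c em m v = true → m < fuel → pvOK init c em tw →
      (findTreeWorthAux em c fuel tw v).2 = pvWF init c em v ∧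
      pvOK init c em (findTreeWorthAux em c fuel tw v).1 := by
  intro m
  induction m with
  | zero =>
    intro v tw fuel _ ht hfuel hok
    match fuel with
    | f + 1 =>
      obtain ⟨hr, hv⟩ := pvT_elim init c em 0 v ht
      have hne : pvRd init (v - 1) ≠ 0 := by
        rcases hv with hv | hv
        · exact hv
        · omega
      have hc : pvRd tw (v - 1) ≠ 0 := by
        rw [pvRd_clause1 init c em tw hok v hr hne]; exact hne
      simp only [findTreeWorthAux]
      rw [if_pos hc]
      exact ⟨(pvOK_read init c em tw hok 0 v ht hc).symm ▸ rfl, hok⟩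
  | succ m ih =>
    intro v tw fuel hmS ht hfuel hok
    match fuel with
    | f + 1 =>
      simp only [findTreeWorthAux]
      by_cases hc : pvRd tw (v - 1) ≠ 0
      · rw [if_pos hc]
        exact ⟨(pvOK_read init c em tw hok (m + 1) v ht hc).symm ▸ rfl, hok⟩
      · rw [if_neg hc]
        push Not at hc
        have h0i := pvZero_node init c em tw hok (m + 1) v ht hc
        obtain ⟨hr, hv⟩ := pvT_elim init c em (m + 1) v ht
        have hrng : -(init.length : Int) ≤ v - 1 ∧ v - 1 < init.length := by
          simpa [PySem.Raise.InRange] using hr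
        rcases hv with hv | hv
        · exact absurd h0i hv
        obtain ⟨_, hv1, _, hch⟩ := hv
        simp only [Nat.add_sub_cancel] at hch
        have Hfold : ∀ (xs : List Int), (∀ x ∈ xs, pvT init c em m x = true) →
            ∀ (tw2 : List Int) (acc : Int), pvOK init c em tw2 →
            (xs.foldl (fun st x =>
                ((findTreeWorthAux em c f st.1 x).1, st.2 + (findTreeWorthAux em c f st.1 x).2))
                (tw2, acc)).2 =
              xs.foldl (fun a x => a + pvWF init c em x) acc ∧
            pvOK init c em (xs.foldl (fun st x =>
                ((findTreeWorthAux em c f st.1 x).1, st.2 + (findTreeWorthAux em c f st.1 x).2))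
                (tw2, acc)).1 := by
          intro xs
          induction xs with
          | nil => intro _ tw2 acc hok2; exact ⟨rfl, hok2⟩
          | cons x xs ihx =>
            intro hbs tw2 acc hok2
            have hbx := hbs x List.mem_cons_self
            have hx := ih x tw2 f (by omega) hbx (by omega) hok2
            simp only [List.foldl_cons]
            rw [hx.1]
            exact ihx (fun y hy => hbs y (List.mem_cons_of_mem _ hy))
              (findTreeWorthAux em c f tw2 x).1 (acc + pvWF init c em x) hx.2
        set q := (pvChildren em v).foldl (fun st x =>
            ((findTreeWorthAux em c f st.1 x).1, st.2 + (findTreeWorthAux em c f st.1 x).2))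
            (tw, (0 : Int)) with hq
        obtain ⟨hr1, hrok⟩ := Hfold (pvChildren em v) hch tw 0 hok
        rw [← hq] at hr1 hrok
        have hlen : q.1.length = init.length := hrok.1
        constructor
        · rw [hr1, pvWF_zero_case init c em m v (by omega) ht h0i]
          omega
        · have hset : ∀ (jj : Int), 0 ≤ jj →
              pvRd (PySem.List.pySetD q.1 (v - 1) (q.2 + pvRd c (v - 1))) jj =
                if jj = v - 1 then q.2 + pvRd c (v - 1) else pvRd q.1 jj := by
            intro jj hjj
            exact pvRd_pySetD q.1 (v - 1) (q.2 + pvRd c (v - 1)) (by omega) (by omega) jj hjj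
          refine ⟨by rw [pvLen_pySetD _ _ _ (by omega)]; exact hlen, ?_⟩
          intro j hj
          have hj0 : (0 : Int) ≤ (j : Int) := by omega
          rw [hset (j : Int) hj0]
          by_cases hjv : (j : Int) = v - 1
          · rw [if_pos hjv]
            constructor
            · intro hni
              rw [← hjv] at h0i
              exact absurd h0i hni
            · intro _
              right
              have hw : (v : Int) = (j : Int) + 1 := by omega
              rw [hr1, ← hw, pvWF_zero_case init c em m v (by omega) ht h0i]
              omega
          · rw [if_neg hjv]
            exact hrok.2 j hj

theorem pvLoopB_nil (em : List (Int × List Int)) (c : List Int) (f : Nat) (tw : List Int) :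
    pvLoopB em c f [] tw = tw := by cases f <;> rfl

theorem pvLoopB_true (em : List (Int × List Int)) (c : List Int) (f : Nat) (v : Int)
    (rest : List (Int × Bool)) (tw : List Int) :
    pvLoopB em c (f + 1) ((v, true) :: rest) tw =
      pvLoopB em c f rest
        (PySem.List.pySetD tw (v - 1)
          (pvRd c (v - 1) + (pvChildren em v).foldl (fun a x => a + pvRd tw (x - 1)) 0)) := by
  simp [pvLoopB]

theorem pvLoopB_false_pos (em : List (Int × List Int)) (c : List Int) (f : Nat) (v : Int)
    (rest : List (Int × Bool)) (tw : List Int) (h : pvRd tw (v - 1) ≠ 0) :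
    pvLoopB em c (f + 1) ((v, false) :: rest) tw = pvLoopB em c f rest tw := by
  simp [pvLoopB, h]

theorem pvLoopB_false_zero (em : List (Int × List Int)) (c : List Int) (f : Nat) (v : Int)
    (rest : List (Int × Bool)) (tw : List Int) (h : pvRd tw (v - 1) = 0) :
    pvLoopB em c (f + 1) ((v, false) :: rest) tw =
      pvLoopB em c f
        (((pvChildren em v).reverse.map (fun x => (x, false))) ++ (v, true) :: rest) tw := by
  simp [pvLoopB, h]

theorem pvMono_refl (init c : List Int) (em : List (Int × List Int)) (tw : List Int) :
    pvMono init c em tw tw := fun _ _ h => h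

theorem pvMono_trans (init c : List Int) (em : List (Int × List Int)) (t1 t2 t3 : List Int)
    (h1 : pvMono init c em t1 t2) (h2 : pvMono init c em t2 t3) : pvMono init c em t1 t3 :=
  fun j hj h => h2 j hj (h1 j hj h)

theorem pvMono_node (init c : List Int) (em : List (Int × List Int)) (t1 t2 : List Int)
    (hm : pvMono init c em t1 t2) (v : Int) (hv1 : 1 ≤ v) (hv2 : v ≤ (init.length : Int))
    (h : pvRd t1 (v - 1) = pvWF init c em v) : pvRd t2 (v - 1) = pvWF init c em v := by
  have hj : (v - 1).toNat < init.length := by omega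
  have hc1 : ((v - 1).toNat : Int) = v - 1 := by omega
  have hv : v - 1 + 1 = v := by omega
  have := hm (v - 1).toNat hj (by rw [hc1, hv]; exact h)
  rw [hc1, hv] at this
  exact this

-- a cell already holding its node's ghost worth still holds it in any pvMono-later array
theorem pvPreserve (init c : List Int) (em : List (Int × List Int)) (t1 t2 : List Int)
    (hok2 : pvOK init c em t2) (hm : pvMono init c em t1 t2) (k : Nat) (x : Int)
    (ht : pvT init c em k x = true) (h1 : pvRd t1 (x - 1) = pvWF init c em x) :
    pvRd t2 (x - 1) = pvWF init c em x := by
  obtain ⟨hr, hv⟩ := pvT_elim init c em k x ht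
  have hrng : -(init.length : Int) ≤ x - 1 ∧ x - 1 < init.length := by
    simpa [PySem.Raise.InRange] using hr
  by_cases h0 : pvRd init (x - 1) = 0
  · have hx1 : 1 ≤ x := by
      rcases hv with hv | hv
      · exact absurd h0 hv
      · exact hv.2.1
    exact pvMono_node init c em t1 t2 hm x hx1 (by omega) h1
  · rw [pvRd_clause1 init c em t2 hok2 x hr h0, pvWF_pos init c em x h0]

theorem findTreeWorth_spec_lemmaB (init c : List Int) (em : List (Int × List Int)) :
    ∀ (m : Nat) (v : Int) (tw : List Int), m ≤ pvSizeEM em + 2 →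
      pvT init c em m v = true → pvOK init c em tw →
      ∃ (k : Nat) (tw' : List Int), k ≤ 2 * (pvSizeEM em + 2) ^ m ∧
        (∀ (rest : List (Int × Bool)) (fuel : Nat),
          pvLoopB em c (k + fuel) ((v, false) :: rest) tw = pvLoopB em c fuel rest tw') ∧
        pvOK init c em tw' ∧ pvRd tw' (v - 1) = pvWF init c em v ∧
        pvMono init c em tw tw' := by
  intro m
  induction m with
  | zero =>
    intro v tw _ ht hok
    obtain ⟨hr, hv⟩ := pvT_elim init c em 0 v ht
    have hne : pvRd init (v - 1) ≠ 0 := by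
      rcases hv with hv | hv
      · exact hv
      · exact absurd hv.1 (by omega)
    have hc : pvRd tw (v - 1) ≠ 0 := by
      rw [pvRd_clause1 init c em tw hok v hr hne]; exact hne
    refine ⟨1, tw, by norm_num, ?_, hok, pvOK_read init c em tw hok 0 v ht hc,
      pvMono_refl init c em tw⟩
    intro rest fuel
    rw [Nat.add_comm 1 fuel, pvLoopB_false_pos em c fuel v rest tw hc]
  | succ m ih =>
    intro v tw hmS ht hok
    have hpowpos : 1 ≤ (pvSizeEM em + 2) ^ m := Nat.one_le_pow _ _ (by omega)
    by_cases hc : pvRd tw (v - 1) ≠ 0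
    · refine ⟨1, tw, ?_, ?_, hok, pvOK_read init c em tw hok (m + 1) v ht hc,
        pvMono_refl init c em tw⟩
      · have : 1 ≤ (pvSizeEM em + 2) ^ (m + 1) := Nat.one_le_pow _ _ (by omega)
        omega
      · intro rest fuel
        rw [Nat.add_comm 1 fuel, pvLoopB_false_pos em c fuel v rest tw hc]
    · push Not at hc
      have h0i := pvZero_node init c em tw hok (m + 1) v ht hc
      obtain ⟨hr, hv⟩ := pvT_elim init c em (m + 1) v ht
      have hrng : -(init.length : Int) ≤ v - 1 ∧ v - 1 < init.length := by
        simpa [PySem.Raise.InRange] using hr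
      rcases hv with hv | hv
      · exact absurd h0i hv
      obtain ⟨_, hv1, _, hch⟩ := hv
      simp only [Nat.add_sub_cancel] at hch
      have Hys : ∀ (ys : List Int), (∀ x ∈ ys, pvT init c em m x = true) →
          ∀ (tw2 : List Int), pvOK init c em tw2 →
          ∃ (k : Nat) (tw'' : List Int),
            k ≤ ys.length * (2 * (pvSizeEM em + 2) ^ m) ∧
            (∀ (rest : List (Int × Bool)) (fuel : Nat),
              pvLoopB em c (k + fuel) (ys.map (fun x => (x, false)) ++ rest) tw2 =
                pvLoopB em c fuel rest tw'') ∧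
            pvOK init c em tw'' ∧ (∀ x ∈ ys, pvRd tw'' (x - 1) = pvWF init c em x) ∧
            pvMono init c em tw2 tw'' := by
        intro ys
        induction ys with
        | nil =>
          intro _ tw2 hok2
          exact ⟨0, tw2, by omega, fun rest fuel => by simp, hok2, by simp,
            pvMono_refl init c em tw2⟩
        | cons x ys ihy =>
          intro hbs tw2 hok2
          have hbx := hbs x List.mem_cons_self
          obtain ⟨k1, t1, hk1, hstep1, hok1, hfin1, hmono1⟩ := ih x tw2 (by omega) hbx hok2
          obtain ⟨k2, t2, hk2, hstep2, hok2', hfin2, hmono2⟩ :=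
            ihy (fun y hy => hbs y (List.mem_cons_of_mem _ hy)) t1 hok1
          refine ⟨k1 + k2, t2, ?_, ?_, hok2', ?_, pvMono_trans init c em tw2 t1 t2 hmono1 hmono2⟩
          · calc k1 + k2 ≤ 2 * (pvSizeEM em + 2) ^ m +
                ys.length * (2 * (pvSizeEM em + 2) ^ m) := Nat.add_le_add hk1 hk2
              _ = (x :: ys).length * (2 * (pvSizeEM em + 2) ^ m) := by
                  simp [List.length_cons]; ring
          · intro rest fuel
            have e1 : k1 + k2 + fuel = k1 + (k2 + fuel) := by omega
            rw [e1]
            simp only [List.map_cons, List.cons_append]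
            rw [hstep1 (ys.map (fun x => (x, false)) ++ rest) (k2 + fuel),
              hstep2 rest fuel]
          · intro y hy
            rcases List.mem_cons.mp hy with rfl | hy'
            · exact pvPreserve init c em t1 t2 hok2' hmono2 m y hbx hfin1
            · exact hfin2 y hy'
      obtain ⟨k', tw'', hk', hstep', hok'', hfinch', hmono''⟩ :=
        Hys (pvChildren em v).reverse (fun x hx => hch x (List.mem_reverse.mp hx)) tw hok
      have hfinch : ∀ x ∈ pvChildren em v, pvRd tw'' (x - 1) = pvWF init c em x :=
        fun x hx => hfinch' x (List.mem_reverse.mpr hx)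
      have hlen'' : tw''.length = init.length := hok''.1
      set w := pvRd c (v - 1) + (pvChildren em v).foldl (fun a x => a + pvRd tw'' (x - 1)) 0
        with hwdef
      have hwval : w = pvWF init c em v := by
        rw [hwdef, pvWF_zero_case init c em m v (by omega) ht h0i]
        congr 1
        apply PySem.List.foldl_congr_mem
        intro acc x hx
        rw [hfinch x hx]
      set twf := PySem.List.pySetD tw'' (v - 1) w with htwf
      have hset : ∀ (jj : Int), 0 ≤ jj →
          pvRd twf jj = if jj = v - 1 then w else pvRd tw'' jj := by
        intro jj hjj
        rw [htwf]
        exact pvRd_pySetD tw'' (v - 1) w (by omega) (by omega) jj hjj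
      have hokf : pvOK init c em twf := by
        refine ⟨by rw [htwf, pvLen_pySetD _ _ _ (by omega)]; exact hlen'', ?_⟩
        intro j hj
        have hj0 : (0 : Int) ≤ (j : Int) := by omega
        rw [hset (j : Int) hj0]
        by_cases hjv : (j : Int) = v - 1
        · rw [if_pos hjv]
          constructor
          · intro hni
            rw [← hjv] at h0i
            exact absurd h0i hni
          · intro _
            right
            have hw1 : (v : Int) = (j : Int) + 1 := by omega
            rw [hwval, ← hw1]
        · rw [if_neg hjv]
          exact hok''.2 j hj
      have hmonof : pvMono init c em tw twf := by
        apply pvMono_trans init c em tw tw'' twf hmono''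
        intro j hj hfin
        have hj0 : (0 : Int) ≤ (j : Int) := by omega
        rw [hset (j : Int) hj0]
        by_cases hjv : (j : Int) = v - 1
        · rw [if_pos hjv]
          have hw1 : (v : Int) = (j : Int) + 1 := by omega
          rw [hwval, ← hw1]
        · rw [if_neg hjv]
          exact hfin
      have hfinv : pvRd twf (v - 1) = pvWF init c em v := by
        rw [hset (v - 1) (by omega), if_pos rfl, hwval]
      refine ⟨k' + 2, twf, ?_, ?_, hokf, hfinv, hmonof⟩
      · have hlench : (pvChildren em v).length ≤ pvSizeEM em := pvChildren_len em v
        have hpow : (pvSizeEM em + 2) ^ (m + 1) = (pvSizeEM em + 2) ^ m * (pvSizeEM em + 2) :=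
          by rw [Nat.pow_succ]
        have : k' ≤ pvSizeEM em * (2 * (pvSizeEM em + 2) ^ m) :=
          le_trans hk' (Nat.mul_le_mul_right _ (by simpa using hlench))
        rw [hpow]
        nlinarith
      · intro rest fuel
        have e1 : k' + 2 + fuel = (k' + (1 + fuel)) + 1 := by omega
        rw [e1, pvLoopB_false_zero em c (k' + (1 + fuel)) v rest tw hc]
        rw [hstep' ((v, true) :: rest) (1 + fuel)]
        have e2 : 1 + fuel = fuel + 1 := by omega
        rw [e2, pvLoopB_true em c fuel v rest tw'']

-- ===== VERDICT (by name: the statement is the Claim_ definition above) =====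
theorem findTreeWorth_spec : Claim_equal_findTreeWorth := by
  intro tw em ti c _ hpre
  simp only [Spec_findTreeWorth]
  have hok0 : pvOK tw c em tw :=
    ⟨rfl, fun j hj => ⟨fun _ => rfl, fun h => Or.inl h⟩⟩
  have hA := findTreeWorth_spec_lemmaA tw c em (pvSizeEM em + 2) ti tw (pvSizeEM em + 3)
    (by omega) hpre (by omega) hok0
  obtain ⟨k, tw', hk, hstep, hok', hfin, hmono⟩ :=
    findTreeWorth_spec_lemmaB tw c em (pvSizeEM em + 2) ti tw (by omega) hpre hok0
  have hkle : k ≤ pvFuelB em := hk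
  obtain ⟨f, hf⟩ : ∃ f, pvFuelB em = k + f := ⟨pvFuelB em - k, by omega⟩
  rw [findTreeWorth_alt, hf, hstep [] f, pvLoopB_nil]
  rw [findTreeWorth, hA.1, hfin]
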